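-- pv_equiv track=rewrite | github.com/bitplane/qemount | src/qemount_build/data/arc/binhex/mkbinhex.py | binhex_encode
-- ===== SOURCE A (Python) =====
-- BINHEX_CHARS = (
--     "!\"#$%&'()*+,-012345689@ABCDEFGHIJKLMNPQRSTUVXYZ[`abcdefhijklmpqr"
-- )
--
-- def binhex_encode(data):
--     """Encode bytes to BinHex base-64-like encoding."""
--     result = []
--     bits = 0
--     n_bits = 0
--     for byte in data:
--         bits = (bits << 8) | byte
--         n_bits += 8
--         while n_bits >= 6:
--             n_bits -= 6
--             result.append(BINHEX_CHARS[(bits >> n_bits) & 0x3F])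
--     if n_bits > 0:
--         result.append(BINHEX_CHARS[(bits << (6 - n_bits)) & 0x3F])
--     return "".join(result)
-- ===== SOURCE B (Python) =====
-- BINHEX_CHARS = (
--     "!\"#$%&'()*+,-012345689@ABCDEFGHIJKLMNPQRSTUVXYZ[`abcdefhijklmpqr"
-- )
--
-- def binhex_encode(data):
--     """Encode bytes to BinHex base-64-like encoding (chunked re-implementation)."""
--     out = []
--     i = 0
--     n = len(data)
--     while n - i >= 3:
--         b0, b1, b2 = data[i], data[i + 1], data[i + 2]
--         out.append(BINHEX_CHARS[(b0 >> 2) & 0x3F])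
--         out.append(BINHEX_CHARS[((b0 << 4) | (b1 >> 4)) & 0x3F])
--         out.append(BINHEX_CHARS[((b1 << 2) | (b2 >> 6)) & 0x3F])
--         out.append(BINHEX_CHARS[b2 & 0x3F])
--         i += 3
--     if n - i == 1:
--         b0 = data[i]
--         out.append(BINHEX_CHARS[(b0 >> 2) & 0x3F])
--         out.append(BINHEX_CHARS[(b0 << 4) & 0x3F])
--     elif n - i == 2:
--         b0, b1 = data[i], data[i + 1]
--         out.append(BINHEX_CHARS[(b0 >> 2) & 0x3F])
--         out.append(BINHEX_CHARS[((b0 << 4) | (b1 >> 4)) & 0x3F])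
--         out.append(BINHEX_CHARS[(b1 << 2) & 0x3F])
--     return "".join(out)
-- ===== Notes on version B (the rewrite author's own statement) =====
-- stated objective: alternative
-- what changed: Replaces A's rolling bit-accumulator with its n_bits counter and inner while-loop by direct iteration over fixed 3-byte chunks emitting 4 chars via constant-size shift/mask formulas, with an explicit 1-/2-byte tail; A's accumulator can grow into a large bignum on some inputs, B's intermediates stay bounded.
import Mathlib
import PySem

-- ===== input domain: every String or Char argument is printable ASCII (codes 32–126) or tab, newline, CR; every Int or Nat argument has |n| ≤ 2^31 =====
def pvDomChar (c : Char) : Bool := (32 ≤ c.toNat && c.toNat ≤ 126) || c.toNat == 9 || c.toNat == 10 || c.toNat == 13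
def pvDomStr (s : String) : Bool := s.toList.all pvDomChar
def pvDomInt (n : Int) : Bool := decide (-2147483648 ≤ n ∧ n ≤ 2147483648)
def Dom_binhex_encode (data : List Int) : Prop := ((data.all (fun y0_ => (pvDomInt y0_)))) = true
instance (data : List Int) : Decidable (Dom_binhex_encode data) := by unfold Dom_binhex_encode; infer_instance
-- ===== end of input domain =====

-- B replaces A's rolling bit-accumulator and inner while-loop with a fixed 3-byte-chunk encoder
-- plus an explicit 1-/2-byte tail (alternative decomposition).

-- ===== PORT A =====
-- the 64-character BinHex alphabet (the Python module constant BINHEX_CHARS)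
def pvBinhexChars : List Char :=
  "!\"#$%&'()*+,-012345689@ABCDEFGHIJKLMNPQRSTUVXYZ[`abcdefhijklmpqr".toList

-- BINHEX_CHARS[i]; exact here because every index passed is (… &&& 63) ∈ [0,63] and the table has 64 chars
def pvBc (i : Int) : Char := pvBinhexChars.getD i.toNat '!'

-- A's inner `while n_bits >= 6` loop (the shift amount n_bits-6 is nonnegative whenever the branch is taken)
def pvAWhile (res : List Char) (bits nb : Int) : List Char × Int :=
  if 6 ≤ nb then
    pvAWhile (res ++ [pvBc (PySem.Int.band (bits >>> (nb - 6).toNat) 63)]) bits (nb - 6)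
  else (res, nb)
termination_by nb.toNat
decreasing_by omega

-- A's `for byte in data` loop
def pvALoop : List Int → List Char → Int → Int → List Char × Int × Int
  | [], res, bits, nb => (res, bits, nb)
  | b :: rest, res, bits, nb =>
    let bits' := PySem.Int.bor (bits <<< (8 : Nat)) b
    let p := pvAWhile res bits' (nb + 8)
    pvALoop rest p.1 bits' p.2

-- A's final `if n_bits > 0` flush
def pvAFinish (r : List Char × Int × Int) : List Char :=
  if 0 < r.2.2 then r.1 ++ [pvBc (PySem.Int.band (r.2.1 <<< (6 - r.2.2).toNat) 63)] else r.1

def binhex_encode (data : List Int) : String :=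
  String.ofList (pvAFinish (pvALoop data [] 0 0))

-- ===== PORT B =====
-- B: consume the data in 3-byte chunks (4 output chars each), then the explicit 1-/2-byte tail
def pvBChunks : List Int → List Char
  | b0 :: b1 :: b2 :: rest =>
    pvBc (PySem.Int.band (b0 >>> (2 : Nat)) 63) ::
    pvBc (PySem.Int.band (PySem.Int.bor (b0 <<< (4 : Nat)) (b1 >>> (4 : Nat))) 63) ::
    pvBc (PySem.Int.band (PySem.Int.bor (b1 <<< (2 : Nat)) (b2 >>> (6 : Nat))) 63) ::
    pvBc (PySem.Int.band b2 63) :: pvBChunks rest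
  | [b0, b1] =>
    [pvBc (PySem.Int.band (b0 >>> (2 : Nat)) 63),
     pvBc (PySem.Int.band (PySem.Int.bor (b0 <<< (4 : Nat)) (b1 >>> (4 : Nat))) 63),
     pvBc (PySem.Int.band (b1 <<< (2 : Nat)) 63)]
  | [b0] =>
    [pvBc (PySem.Int.band (b0 >>> (2 : Nat)) 63),
     pvBc (PySem.Int.band (b0 <<< (4 : Nat)) 63)]
  | [] => []

def binhex_encode_alt (data : List Int) : String := String.ofList (pvBChunks data)

-- ===== PRECONDITION & SPEC =====
def Spec_binhex_encode (data : List Int) (out : String) : Prop := out = binhex_encode_alt data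
instance (data : List Int) (out : String) : Decidable (Spec_binhex_encode data out) := by unfold Spec_binhex_encode; infer_instance

-- ===== CLAIM (what is proved, stated in full; the proofs are below) =====
def Claim_equal_binhex_encode : Prop := ∀ (data : List Int), Dom_binhex_encode data → Spec_binhex_encode data (binhex_encode data)

-- ===== LEMMAS AND PROOFS =====

-- Nat: the AND-part and the DIFF-part of m partition m
theorem pv_and_add_ldiff (m : Nat) : ∀ n, (m &&& n) + Nat.ldiff m n = m := by
  induction m using Nat.binaryRec with
  | zero => intro n; simp [Nat.ldiff]
  | bit b m ih =>
    intro n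
    rw [← Nat.bit_testBit_zero_shiftRight_one (n := n), Nat.land_bit, Nat.ldiff_bit,
      Nat.bit_val, Nat.bit_val, Nat.bit_val]
    have := ih (n >>> 1)
    cases b <;> cases n.testBit 0 <;> simp <;> omega

-- PySem's Python-exact band/bor agree with Mathlib's Int.land/Int.lor
theorem pv_band_eq_land (a b : Int) : PySem.Int.band a b = Int.land a b := by
  unfold PySem.Int.band
  cases a with
  | ofNat m =>
    rw [if_pos (by exact Int.natCast_nonneg m)]
    cases b with
    | ofNat n => rw [if_pos (by exact Int.natCast_nonneg n)]; rfl
    | negSucc n =>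
      rw [if_neg (by rw [Int.negSucc_eq]; omega)]
      have h2 : (-(Int.negSucc n) - 1).toNat = n := by rw [Int.negSucc_eq]; omega
      have h3 := pv_and_add_ldiff m n
      show (↑(m - (m &&& (-(Int.negSucc n) - 1).toNat)) : Int) = Nat.ldiff m n
      rw [h2]
      omega
  | negSucc m =>
    rw [if_neg (by rw [Int.negSucc_eq]; omega)]
    have h2 : (-(Int.negSucc m) - 1).toNat = m := by rw [Int.negSucc_eq]; omega
    cases b with
    | ofNat n =>
      rw [if_pos (by exact Int.natCast_nonneg n)]
      have h3 := pv_and_add_ldiff n m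
      show (↑(n - (n &&& (-(Int.negSucc m) - 1).toNat)) : Int) = Nat.ldiff n m
      rw [h2]
      omega
    | negSucc n =>
      rw [if_neg (by rw [Int.negSucc_eq]; omega)]
      have h5 : (-(Int.negSucc n) - 1).toNat = n := by rw [Int.negSucc_eq]; omega
      show -(↑((-(Int.negSucc m) - 1).toNat ||| (-(Int.negSucc n) - 1).toNat) : Int) - 1
          = Int.negSucc (m ||| n)
      rw [h2, h5, Int.negSucc_eq]
      ring

theorem pv_bor_eq_lor (a b : Int) : PySem.Int.bor a b = Int.lor a b := by
  unfold PySem.Int.bor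
  cases a with
  | ofNat m =>
    rw [if_pos (by exact Int.natCast_nonneg m)]
    cases b with
    | ofNat n => rw [if_pos (by exact Int.natCast_nonneg n)]; rfl
    | negSucc n =>
      rw [if_neg (by rw [Int.negSucc_eq]; omega)]
      have h2 : (-(Int.negSucc n) - 1).toNat = n := by rw [Int.negSucc_eq]; omega
      have h3 := pv_and_add_ldiff n m
      show -(↑((-(Int.negSucc n) - 1).toNat - ((-(Int.negSucc n) - 1).toNat &&& (Int.ofNat m).toNat)) : Int) - 1
          = Int.negSucc (Nat.ldiff n m)
      rw [h2, Int.negSucc_eq]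
      have hm : (Int.ofNat m).toNat = m := rfl
      rw [hm]
      omega
  | negSucc m =>
    rw [if_neg (by rw [Int.negSucc_eq]; omega)]
    have h2 : (-(Int.negSucc m) - 1).toNat = m := by rw [Int.negSucc_eq]; omega
    cases b with
    | ofNat n =>
      rw [if_pos (by exact Int.natCast_nonneg n)]
      have h3 := pv_and_add_ldiff m n
      show -(↑((-(Int.negSucc m) - 1).toNat - ((-(Int.negSucc m) - 1).toNat &&& (Int.ofNat n).toNat)) : Int) - 1
          = Int.negSucc (Nat.ldiff m n)
      rw [h2, Int.negSucc_eq]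
      have hn : (Int.ofNat n).toNat = n := rfl
      rw [hn]
      omega
    | negSucc n =>
      rw [if_neg (by rw [Int.negSucc_eq]; omega)]
      have h5 : (-(Int.negSucc n) - 1).toNat = n := by rw [Int.negSucc_eq]; omega
      show -(↑((-(Int.negSucc m) - 1).toNat &&& (-(Int.negSucc n) - 1).toNat) : Int) - 1
          = Int.negSucc (m &&& n)
      rw [h2, h5, Int.negSucc_eq]
      ring

-- Int testBit extensionality
theorem pv_int_ext {a b : Int} (h : ∀ i, a.testBit i = b.testBit i) : a = b := by
  cases a with
  | ofNat m =>
    cases b with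
    | ofNat n =>
      have : m = n := by
        apply Nat.eq_of_testBit_eq
        intro i
        simpa [Int.testBit] using h i
      simp [this]
    | negSucc n =>
      exfalso
      have hm : m.testBit (m + n) = false :=
        Nat.testBit_eq_false_of_lt
          (lt_of_lt_of_le Nat.lt_two_pow_self (Nat.pow_le_pow_right (by omega) (by omega)))
      have hn : n.testBit (m + n) = false :=
        Nat.testBit_eq_false_of_lt
          (lt_of_lt_of_le Nat.lt_two_pow_self (Nat.pow_le_pow_right (by omega) (by omega)))
      have := h (m + n)
      simp [Int.testBit, hm, hn] at this
  | negSucc m =>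
    cases b with
    | ofNat n =>
      exfalso
      have hm : m.testBit (m + n) = false :=
        Nat.testBit_eq_false_of_lt
          (lt_of_lt_of_le Nat.lt_two_pow_self (Nat.pow_le_pow_right (by omega) (by omega)))
      have hn : n.testBit (m + n) = false :=
        Nat.testBit_eq_false_of_lt
          (lt_of_lt_of_le Nat.lt_two_pow_self (Nat.pow_le_pow_right (by omega) (by omega)))
      have := h (m + n)
      simp [Int.testBit, hm, hn] at this
    | negSucc n =>
      have : m = n := by
        apply Nat.eq_of_testBit_eq
        intro i
        simpa [Int.testBit] using h i
      simp [this]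

-- testBit of Int shifts (Nat shift amount)
theorem pv_testBit_shr (a : Int) (s i : Nat) : (a >>> s).testBit i = a.testBit (s + i) := by
  cases a with
  | ofNat m =>
    show (Int.ofNat (m >>> s)).testBit i = _
    simp [Int.testBit, Nat.testBit_shiftRight]
  | negSucc m =>
    show (Int.negSucc (m >>> s)).testBit i = _
    simp [Int.testBit, Nat.testBit_shiftRight]

theorem pv_nat_shl_sub_one_testBit (n : Nat) :
    ∀ s j, ((n + 1) <<< s - 1).testBit j = (decide (j < s) || n.testBit (j - s)) := by
  intro s
  induction s with
  | zero => intro j; simp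
  | succ s ih =>
    intro j
    have hpos : 1 ≤ (n + 1) <<< s := by
      rw [Nat.shiftLeft_eq]
      have : 0 < 2 ^ s := Nat.two_pow_pos s
      nlinarith
    have hb : (n + 1) <<< (s + 1) - 1 = Nat.bit true ((n + 1) <<< s - 1) := by
      rw [Nat.shiftLeft_succ, Nat.bit_val]
      simp
      omega
    rw [hb]
    cases j with
    | zero => rw [Nat.testBit_bit_zero]; simp
    | succ j => rw [Nat.testBit_bit_succ]; rw [ih j]; simp [Nat.succ_sub_succ]

theorem pv_testBit_shl (a : Int) (s i : Nat) :
    (a <<< s).testBit i = (decide (s ≤ i) && a.testBit (i - s)) := by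
  cases a with
  | ofNat m =>
    show (Int.ofNat (m <<< s)).testBit i = _
    simp [Int.testBit, Nat.testBit_shiftLeft]
  | negSucc m =>
    show (Int.negSucc ((m + 1) <<< s - 1)).testBit i = _
    simp [Int.testBit, pv_nat_shl_sub_one_testBit]
    by_cases h : s ≤ i <;> simp [h]

-- testBit of the 6-bit mask
theorem pv_testBit_63 (i : Nat) : (63 : Int).testBit i = decide (i < 6) := by
  show (Int.ofNat 63).testBit i = decide (i < 6)
  simp only [Int.testBit]
  by_cases hi : i < 6
  · interval_cases i <;> decide
  · have h63 : (63 : Nat) < 2 ^ i :=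
      lt_of_lt_of_le (show (63 : Nat) < 2 ^ 6 by norm_num)
        (Nat.pow_le_pow_right (by omega) (by omega))
    simp [Nat.testBit_eq_false_of_lt h63, hi]

-- two band-_-63 values agree as soon as the low 6 bits agree
theorem pv_band63_congr {a b : Int} (h : ∀ i, i < 6 → a.testBit i = b.testBit i) :
    PySem.Int.band a 63 = PySem.Int.band b 63 := by
  rw [pv_band_eq_land, pv_band_eq_land]
  apply pv_int_ext
  intro i
  rw [Int.testBit_land, Int.testBit_land, pv_testBit_63]
  by_cases hi : i < 6
  · simp [h i hi, hi]
  · simp [hi]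

-- chunk identities: A's 6-bit window reads equal B's per-chunk formulas (any accumulator carry-in x)
theorem pv_I1 (x b0 : Int) :
    PySem.Int.band (PySem.Int.bor (x <<< (8 : Nat)) b0 >>> (2 : Nat)) 63 =
      PySem.Int.band (b0 >>> (2 : Nat)) 63 := by
  apply pv_band63_congr
  intro i hi
  simp only [pv_bor_eq_lor, pv_testBit_shr, pv_testBit_shl, Int.testBit_lor]
  simp [show ¬ (8 ≤ 2 + i) by omega]

theorem pv_I2 (x b0 b1 : Int) :
    PySem.Int.band
        (PySem.Int.bor (PySem.Int.bor (x <<< (8 : Nat)) b0 <<< (8 : Nat)) b1 >>> (4 : Nat)) 63 =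
      PySem.Int.band (PySem.Int.bor (b0 <<< (4 : Nat)) (b1 >>> (4 : Nat))) 63 := by
  apply pv_band63_congr
  intro i hi
  simp only [pv_bor_eq_lor, pv_testBit_shr, pv_testBit_shl, Int.testBit_lor]
  by_cases h4 : 4 ≤ i
  · simp [show 8 ≤ 4 + i by omega, show ¬ (8 ≤ i - 4) by omega,
      show 4 + i - 8 = i - 4 by omega, h4]
  · simp [show ¬ (8 ≤ 4 + i) by omega, h4]

theorem pv_I3 (u b1 b2 : Int) :
    PySem.Int.band
        (PySem.Int.bor (PySem.Int.bor (u <<< (8 : Nat)) b1 <<< (8 : Nat)) b2 >>> (6 : Nat)) 63 =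
      PySem.Int.band (PySem.Int.bor (b1 <<< (2 : Nat)) (b2 >>> (6 : Nat))) 63 := by
  apply pv_band63_congr
  intro i hi
  simp only [pv_bor_eq_lor, pv_testBit_shr, pv_testBit_shl, Int.testBit_lor]
  by_cases h2 : 2 ≤ i
  · simp [show 8 ≤ 6 + i by omega, show ¬ (8 ≤ i - 2) by omega,
      show 6 + i - 8 = i - 2 by omega, h2]
  · simp [show ¬ (2 ≤ i) by omega, show ¬ (8 ≤ 6 + i) by omega]

theorem pv_I4 (u b2 : Int) :
    PySem.Int.band (PySem.Int.bor (u <<< (8 : Nat)) b2) 63 =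
      PySem.Int.band b2 63 := by
  apply pv_band63_congr
  intro i hi
  simp only [pv_bor_eq_lor, pv_testBit_shl, Int.testBit_lor]
  simp [show ¬ (8 ≤ i) by omega]

theorem pv_I5 (x b : Int) (k : Nat) (hk : k ≤ 6) :
    PySem.Int.band (PySem.Int.bor (x <<< (8 : Nat)) b <<< k) 63 =
      PySem.Int.band (b <<< k) 63 := by
  apply pv_band63_congr
  intro i hi
  simp only [pv_bor_eq_lor, pv_testBit_shr, pv_testBit_shl, Int.testBit_lor]
  by_cases h : k ≤ i
  · simp [h, show ¬ (8 ≤ i - k) by omega]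
  · simp [h]

-- computed forms of the while loop at the three n_bits values it is entered with
theorem pv_aw8 (res : List Char) (u : Int) :
    pvAWhile res u 8 = (res ++ [pvBc (PySem.Int.band (u >>> (2 : Nat)) 63)], 2) := by
  rw [pvAWhile, if_pos (by omega : (6:Int) ≤ 8)]
  rw [pvAWhile, if_neg (by omega : ¬ (6:Int) ≤ 8 - 6)]
  norm_num [show Int.toNat 0 = 0 from rfl, show Int.toNat 2 = 2 from rfl,
    show Int.toNat 4 = 4 from rfl, show Int.toNat 6 = 6 from rfl, Int.shiftRight_zero]

theorem pv_aw10 (res : List Char) (u : Int) :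
    pvAWhile res u 10 = (res ++ [pvBc (PySem.Int.band (u >>> (4 : Nat)) 63)], 4) := by
  rw [pvAWhile, if_pos (by omega : (6:Int) ≤ 10)]
  rw [pvAWhile, if_neg (by omega : ¬ (6:Int) ≤ 10 - 6)]
  norm_num [show Int.toNat 0 = 0 from rfl, show Int.toNat 2 = 2 from rfl,
    show Int.toNat 4 = 4 from rfl, show Int.toNat 6 = 6 from rfl, Int.shiftRight_zero]

theorem pv_aw12 (res : List Char) (u : Int) :
    pvAWhile res u 12 =
      (res ++ [pvBc (PySem.Int.band (u >>> (6 : Nat)) 63),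
               pvBc (PySem.Int.band u 63)], 0) := by
  rw [pvAWhile, if_pos (by omega : (6:Int) ≤ 12)]
  rw [pvAWhile, if_pos (by omega : (6:Int) ≤ 12 - 6)]
  rw [pvAWhile, if_neg (by omega : ¬ (6:Int) ≤ 12 - 6 - 6)]
  norm_num [show Int.toNat 0 = 0 from rfl, show Int.toNat 2 = 2 from rfl,
    show Int.toNat 4 = 4 from rfl, show Int.toNat 6 = 6 from rfl, Int.shiftRight_zero]

-- main invariant: from a chunk boundary (n_bits = 0, any accumulator x),
-- A's loop followed by its flush appends exactly B's output
theorem pv_main (data : List Int) : ∀ (res : List Char) (x : Int),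
    pvAFinish (pvALoop data res x 0) = res ++ pvBChunks data := by
  induction data using pvBChunks.induct with
  | case1 b0 b1 b2 rest ih =>
    intro res x
    simp only [pvALoop, zero_add, pv_aw8]
    simp only [show (2 : Int) + 8 = 10 by norm_num, pv_aw10]
    simp only [show (4 : Int) + 8 = 12 by norm_num, pv_aw12]
    rw [ih]
    simp [pvBChunks, pv_I1, pv_I2, pv_I3, pv_I4]
  | case2 b0 b1 =>
    intro res x
    simp only [pvALoop, zero_add, pv_aw8]
    simp only [show (2 : Int) + 8 = 10 by norm_num, pv_aw10]
    simp only [pvAFinish]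
    norm_num [show Int.toNat 0 = 0 from rfl, show Int.toNat 2 = 2 from rfl,
      show Int.toNat 4 = 4 from rfl, show Int.toNat 6 = 6 from rfl, Int.shiftRight_zero]
    rw [pv_I5 _ _ 2 (by omega)]
    simp [pvBChunks, pv_I1, pv_I2]
  | case3 b0 =>
    intro res x
    simp only [pvALoop, zero_add, pv_aw8]
    simp only [pvAFinish]
    norm_num [show Int.toNat 0 = 0 from rfl, show Int.toNat 2 = 2 from rfl,
      show Int.toNat 4 = 4 from rfl, show Int.toNat 6 = 6 from rfl, Int.shiftRight_zero]
    rw [pv_I5 _ _ 4 (by omega)]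
    simp [pvBChunks, pv_I1]
  | case4 =>
    intro res x
    simp [pvALoop, pvAFinish, pvBChunks]

-- ===== VERDICT (by name: the statement is the Claim_ definition above) =====
theorem binhex_encode_spec : Claim_equal_binhex_encode := by
  intro data _
  show binhex_encode data = binhex_encode_alt data
  unfold binhex_encode binhex_encode_alt
  rw [pv_main]
  simp
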